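-- pv_equiv track=rewrite | github.com/sunilgitb/DSAlgo-Python | 07_Graph/08. Reorder Routes to Make All Paths Lead to the City Zero.py | minReorderDFS
-- ===== SOURCE A (Python) =====
-- from typing import List
--
-- def minReorderDFS(n: int, connections: List[List[int]]) -> int:
--     """
--     Alternative DFS recursive implementation
--     """
--     # Build graph
--     graph = [[] for _ in range(n)]
--     for a, b in connections:
--         graph[a].append((b, 1))   # 1 means needs reversal
--         graph[b].append((a, 0))   # 0 means correct direction
--
--     visited = [False] * n
--
--     def dfs(city):
--         visited[city] = True
--         changes = 0
--         for neighbor, needs_reversal in graph[city]: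
--             if not visited[neighbor]:
--                 changes += needs_reversal
--                 changes += dfs(neighbor)
--         return changes
--
--     return dfs(0)
-- ===== SOURCE B (Python) =====
-- from typing import List
--
-- def minReorderDFS(n: int, connections: List[List[int]]) -> int:
--     # Iterative explicit-stack DFS (same adjacency list, recursion replaced by a stack).
--     graph = [[] for _ in range(n)]
--     for a, b in connections:
--         graph[a].append((b, 1))
--         graph[b].append((a, 0))
--
--     visited = [False] * n
--     total = 0
--     stack = [(0, 0)]
--     while stack:
--         city, flag = stack.pop()
--         if visited[city]:
--             continue
--         visited[city] = True
--         total += flag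
--         for pair in reversed(graph[city]):
--             stack.append(pair)
--     return total
-- ===== Notes on version B (the rewrite author's own statement) =====
-- stated objective: alternative
-- what changed: The recursive DFS with a nested closure is replaced by an iterative explicit-stack DFS (mark-at-pop, neighbors pushed in reverse), removing recursion while keeping the same adjacency-list traversal and O(V+E) cost.
import Mathlib
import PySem

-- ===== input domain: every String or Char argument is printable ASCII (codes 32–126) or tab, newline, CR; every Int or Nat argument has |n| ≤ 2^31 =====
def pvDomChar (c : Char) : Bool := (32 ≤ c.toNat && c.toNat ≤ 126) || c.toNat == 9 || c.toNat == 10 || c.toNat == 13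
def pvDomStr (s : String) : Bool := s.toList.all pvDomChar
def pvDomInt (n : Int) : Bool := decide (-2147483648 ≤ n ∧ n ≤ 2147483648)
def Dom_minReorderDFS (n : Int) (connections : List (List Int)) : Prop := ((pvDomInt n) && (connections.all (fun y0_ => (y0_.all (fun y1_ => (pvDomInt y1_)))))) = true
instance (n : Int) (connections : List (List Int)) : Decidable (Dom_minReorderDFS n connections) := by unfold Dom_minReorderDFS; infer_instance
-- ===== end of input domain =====

-- B re-implements A's recursive DFS as an explicit-stack iterative DFS over the same
-- adjacency list (mark-at-pop, neighbors pushed in reverse), same O(V+E) cost.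

-- ===== PORT A =====
-- shared helpers: Python list indexing/assignment (negative indices wrap; both Pythons
-- build the identical adjacency list and visited list, so both ports use these).
def pvGetVis (V : List Bool) (i : Int) : Bool := PySem.List.pyGetD V i true
def pvSetVis (V : List Bool) (i : Int) : List Bool := PySem.List.pySetD V i true
def pvUnvis (V : List Bool) : Nat := V.count false
def pvNbrs (g : List (List (Int × Int))) (c : Int) : List (Int × Int) := PySem.List.pyGetD g c []

-- graph[a].append((b,1)); graph[b].append((a,0)) over all connections (identical in A and B)
def pvBuildGraph (n : Int) (connections : List (List Int)) : List (List (Int × Int)) :=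
  connections.foldl (fun g c =>
    match c with
    | [a, b] =>
      let g1 := PySem.List.pySetD g a (PySem.List.pyGetD g a [] ++ [(b, 1)])
      PySem.List.pySetD g1 b (PySem.List.pyGetD g1 b [] ++ [(a, 0)])
    | _ => g) (List.replicate n.toNat [])

theorem pvLexSub {a t r1 r2 : Nat} (h : r1 < r2) :
    Prod.Lex (· < ·) (· < ·) (a - t, r1) ((a : Nat), r2) := by
  rcases Nat.lt_or_ge (a - t) a with hlt | hge
  · exact Prod.Lex.left _ _ hlt
  · have h2 : a - t = a := Nat.le_antisymm (Nat.sub_le _ _) hge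
    rw [h2]; exact Prod.Lex.right _ h

-- A's recursive dfs, with the mutable `visited` threaded through and a fuel counter as
-- a pure totality guard: one unit is consumed per newly marked city (the remaining fuel
-- is recomputed from the drop of `pvUnvis`, which equals the marks made by the call),
-- so the initial fuel n.toNat+1 is never exhausted on inputs where the Python returns.
mutual
def pvDfsA (g : List (List (Int × Int))) (fuel : Nat) (city : Int) (V : List Bool) : Int × List Bool :=
  match fuel with
  | 0 => (0, V)
  | Nat.succ f => pvDfsLoopA g f (pvNbrs g city) (pvSetVis V city) 0
termination_by (fuel, 0)

-- the `for neighbor, needs_reversal in graph[city]` loop inside dfs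
def pvDfsLoopA (g : List (List (Int × Int))) (fuel : Nat) (lst : List (Int × Int)) (V : List Bool) (acc : Int) : Int × List Bool :=
  match lst with
  | [] => (acc, V)
  | (nb, fl) :: rest =>
    if pvGetVis V nb then pvDfsLoopA g fuel rest V acc
    else
      let r := pvDfsA g fuel nb V
      pvDfsLoopA g (fuel - (pvUnvis V - pvUnvis r.2)) rest r.2 (acc + fl + r.1)
termination_by (fuel, lst.length + 1)
decreasing_by
  · exact Prod.Lex.right _ (by simp only [List.length_cons]; omega)
  · exact Prod.Lex.right _ (by simp only [List.length_cons]; omega)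
  · refine pvLexSub ?_; simp only [List.length_cons]; omega
end

def minReorderDFS (n : Int) (connections : List (List Int)) : Int :=
  (pvDfsA (pvBuildGraph n connections) (n.toNat + 1) 0 (List.replicate n.toNat false)).1

-- ===== PORT B =====
-- B's while-loop: stack modelled head-at-top, so `for pair in reversed(graph[city]):
-- stack.append(pair)` is prepending graph[city]; same fuel guard as A's port
-- (consumed per newly marked city, never exhausted from n.toNat+1).
def pvLoopB (g : List (List (Int × Int))) (fuel : Nat) (V : List Bool) (stack : List (Int × Int)) (acc : Int) : Int :=
  match stack with
  | [] => acc
  | (city, fl) :: rest =>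
    if pvGetVis V city then pvLoopB g fuel V rest acc
    else
      match fuel with
      | 0 => pvLoopB g 0 V rest (acc + fl)
      | Nat.succ f => pvLoopB g f (pvSetVis V city) (pvNbrs g city ++ rest) (acc + fl)
termination_by (fuel, stack.length)
decreasing_by
  · exact Prod.Lex.right _ (by simp only [List.length_cons]; omega)
  · exact Prod.Lex.right _ (by simp only [List.length_cons]; omega)
  · exact Prod.Lex.left _ _ (by omega)

def minReorderDFS_alt (n : Int) (connections : List (List Int)) : Int :=
  pvLoopB (pvBuildGraph n connections) (n.toNat + 1) (List.replicate n.toNat false) [(0, 0)] 0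

-- ===== PRECONDITION & SPEC =====
-- Pre_ excludes exactly the inputs where A raises: n < 1 (visited[0] IndexError),
-- a connection whose length is not 2 (unpacking ValueError), or an endpoint outside
-- [-n, n) (IndexError on graph[a]/graph[b]).
def Pre_minReorderDFS (n : Int) (connections : List (List Int)) : Prop :=
  1 ≤ n ∧ ∀ c ∈ connections, c.length = 2 ∧ ∀ x ∈ c, -n ≤ x ∧ x < n
instance (n : Int) (connections : List (List Int)) : Decidable (Pre_minReorderDFS n connections) := by unfold Pre_minReorderDFS; infer_instance
def pvWitness_minReorderDFS : Int × List (List Int) := (4, [[0, 1], [1, 2], [3, 2]])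

def Spec_minReorderDFS (n : Int) (connections : List (List Int)) (out : Int) : Prop := out = minReorderDFS_alt n connections
instance (n : Int) (connections : List (List Int)) (out : Int) : Decidable (Spec_minReorderDFS n connections out) := by unfold Spec_minReorderDFS; infer_instance

-- ===== CLAIM (what is proved, stated in full; the proofs are below) =====
def Claim_equal_minReorderDFS : Prop := ∀ (n : Int) (connections : List (List Int)), Dom_minReorderDFS n connections → Pre_minReorderDFS n connections → Spec_minReorderDFS n connections (minReorderDFS n connections)

-- ===== LEMMAS AND PROOFS =====

theorem pv_count_set_true_le (V : List Bool) (k : Nat) :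
    (V.set k true).count false ≤ V.count false := by
  induction V generalizing k with
  | nil => simp
  | cons b t ih =>
    cases k with
    | zero => cases b <;> simp
    | succ k => simp only [List.set, List.count_cons]; have := ih k; omega

theorem pv_count_set_true_eq (V : List Bool) (k : Nat) (h : V[k]? = some false) :
    V.count false = (V.set k true).count false + 1 := by
  induction V generalizing k with
  | nil => simp at h
  | cons b t ih =>
    cases k with
    | zero =>
      simp at h
      subst h
      simp
    | succ k =>
      simp at h
      simp only [List.set, List.count_cons]
      have := ih k (by simpa using h)
      omega

theorem pvUnvis_setVis_le (V : List Bool) (i : Int) :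
    pvUnvis (pvSetVis V i) ≤ pvUnvis V := by
  unfold pvSetVis pvUnvis PySem.List.pySetD PySem.List.pySet?
  rcases h : PySem.List.pyIdx? V.length i with _ | k
  · simp
  · simpa using pv_count_set_true_le V k

theorem pvUnvis_setVis_eq (V : List Bool) (i : Int) (h : pvGetVis V i = false) :
    pvUnvis V = pvUnvis (pvSetVis V i) + 1 := by
  unfold pvGetVis PySem.List.pyGetD PySem.List.pyGet? at h
  unfold pvSetVis pvUnvis PySem.List.pySetD PySem.List.pySet?
  rcases hk : PySem.List.pyIdx? V.length i with _ | k
  · rw [hk] at h; simp at h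
  · rw [hk] at h
    simp only [Option.bind_some] at h
    rcases hv : V[k]? with _ | b
    · rw [hv] at h; simp at h
    · rw [hv] at h; simp at h
      subst h
      simpa using pv_count_set_true_eq V k hv

theorem pvLoopB_nil (g : List (List (Int × Int))) (fuel : Nat) (V : List Bool) (acc : Int) :
    pvLoopB g fuel V [] acc = acc := by
  rw [pvLoopB.eq_def]

theorem pvLoopB_cons_visited (g : List (List (Int × Int))) (fuel : Nat) (V : List Bool)
    (city fl : Int) (rest : List (Int × Int)) (acc : Int) (h : pvGetVis V city = true) :
    pvLoopB g fuel V ((city, fl) :: rest) acc = pvLoopB g fuel V rest acc := by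
  rw [pvLoopB.eq_def]; simp [h]

theorem pvLoopB_cons_zero (g : List (List (Int × Int))) (V : List Bool)
    (city fl : Int) (rest : List (Int × Int)) (acc : Int) (h : pvGetVis V city = false) :
    pvLoopB g 0 V ((city, fl) :: rest) acc = pvLoopB g 0 V rest (acc + fl) := by
  rw [pvLoopB.eq_def]; simp [h]

theorem pvLoopB_cons_new (g : List (List (Int × Int))) (f : Nat) (V : List Bool)
    (city fl : Int) (rest : List (Int × Int)) (acc : Int) (h : pvGetVis V city = false) :
    pvLoopB g (f + 1) V ((city, fl) :: rest) acc =
      pvLoopB g f (pvSetVis V city) (pvNbrs g city ++ rest) (acc + fl) := by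
  rw [pvLoopB.eq_def]; simp [h]

theorem pvDfsA_zero (g : List (List (Int × Int))) (city : Int) (V : List Bool) :
    pvDfsA g 0 city V = (0, V) := by
  rw [pvDfsA.eq_def]

theorem pvDfsA_succ (g : List (List (Int × Int))) (f : Nat) (city : Int) (V : List Bool) :
    pvDfsA g (f + 1) city V = pvDfsLoopA g f (pvNbrs g city) (pvSetVis V city) 0 := by
  rw [pvDfsA.eq_def]

theorem pvDfsLoopA_nil (g : List (List (Int × Int))) (fuel : Nat) (V : List Bool) (acc : Int) :
    pvDfsLoopA g fuel [] V acc = (acc, V) := by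
  rw [pvDfsLoopA.eq_def]

theorem pvDfsLoopA_cons_visited (g : List (List (Int × Int))) (fuel : Nat) (V : List Bool)
    (nb fl : Int) (rest : List (Int × Int)) (acc : Int) (h : pvGetVis V nb = true) :
    pvDfsLoopA g fuel ((nb, fl) :: rest) V acc = pvDfsLoopA g fuel rest V acc := by
  rw [pvDfsLoopA.eq_def]; simp [h]

theorem pvDfsLoopA_cons_new (g : List (List (Int × Int))) (fuel : Nat) (V : List Bool)
    (nb fl : Int) (rest : List (Int × Int)) (acc : Int) (h : pvGetVis V nb = false) :
    pvDfsLoopA g fuel ((nb, fl) :: rest) V acc =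
      pvDfsLoopA g (fuel - (pvUnvis V - pvUnvis (pvDfsA g fuel nb V).2)) rest
        (pvDfsA g fuel nb V).2 (acc + fl + (pvDfsA g fuel nb V).1) := by
  rw [pvDfsLoopA.eq_def]; simp [h]

theorem pvMonoLoop (g : List (List (Int × Int))) :
    ∀ (fuel : Nat) (lst : List (Int × Int)) (V : List Bool) (acc : Int),
      pvUnvis (pvDfsLoopA g fuel lst V acc).2 ≤ pvUnvis V := by
  apply pvDfsLoopA.induct g
    (motive1 := fun fuel city V => pvUnvis (pvDfsA g fuel city V).2 ≤ pvUnvis V)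
    (motive2 := fun fuel lst V acc => pvUnvis (pvDfsLoopA g fuel lst V acc).2 ≤ pvUnvis V)
  · intro city V; simp [pvDfsA_zero]
  · intro city V f ih
    rw [pvDfsA.eq_def]
    exact le_trans ih (pvUnvis_setVis_le V city)
  · intro fuel V acc; simp [pvDfsLoopA_nil]
  · intro fuel V acc nb fl rest h ih
    rw [pvDfsLoopA_cons_visited g fuel V nb fl rest acc h]; exact ih
  · intro fuel V acc nb fl rest h r ih1 ih2
    have h' : pvGetVis V nb = false := by simpa using h
    rw [pvDfsLoopA_cons_new g fuel V nb fl rest acc h']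
    exact le_trans ih2 ih1

theorem pvMonoA (g : List (List (Int × Int))) (fuel : Nat) (city : Int) (V : List Bool) :
    pvUnvis (pvDfsA g fuel city V).2 ≤ pvUnvis V := by
  cases fuel with
  | zero => simp [pvDfsA_zero]
  | succ f =>
    rw [pvDfsA_succ]
    exact le_trans (pvMonoLoop g f _ _ 0) (pvUnvis_setVis_le V city)

theorem pvKeyLoop (g : List (List (Int × Int))) :
    ∀ (fuel : Nat) (lst : List (Int × Int)) (V : List Bool) (acc : Int),
      ∀ (rest : List (Int × Int)) (d : Int),
        pvLoopB g fuel V (lst ++ rest) (d + acc) =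
          pvLoopB g (fuel - (pvUnvis V - pvUnvis (pvDfsLoopA g fuel lst V acc).2))
            (pvDfsLoopA g fuel lst V acc).2 rest (d + (pvDfsLoopA g fuel lst V acc).1) := by
  apply pvDfsLoopA.induct g
    (motive1 := fun fuel city V => ∀ (X : List (Int × Int)) (e : Int) (s : Nat),
      fuel = s + 1 → pvGetVis V city = false →
      pvLoopB g s (pvSetVis V city) (pvNbrs g city ++ X) e =
        pvLoopB g (fuel - (pvUnvis V - pvUnvis (pvDfsA g fuel city V).2))
          (pvDfsA g fuel city V).2 X (e + (pvDfsA g fuel city V).1))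
    (motive2 := fun fuel lst V acc => ∀ (rest : List (Int × Int)) (d : Int),
      pvLoopB g fuel V (lst ++ rest) (d + acc) =
        pvLoopB g (fuel - (pvUnvis V - pvUnvis (pvDfsLoopA g fuel lst V acc).2))
          (pvDfsLoopA g fuel lst V acc).2 rest (d + (pvDfsLoopA g fuel lst V acc).1))
  · intro city V X e s hs; omega
  · intro city V f ih X e s hs hvis
    have hsf : f = s := by omega
    subst hsf
    rw [pvDfsA_succ]
    have h1 := pvUnvis_setVis_eq V city hvis
    have h2 := pvMonoLoop g f (pvNbrs g city) (pvSetVis V city) 0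
    have h3 := ih X e
    simp only [add_zero] at h3
    rw [h3]
    have hfuel : f - (pvUnvis (pvSetVis V city) -
        pvUnvis (pvDfsLoopA g f (pvNbrs g city) (pvSetVis V city) 0).2) =
        f + 1 - (pvUnvis V -
        pvUnvis (pvDfsLoopA g f (pvNbrs g city) (pvSetVis V city) 0).2) := by omega
    rw [hfuel]
  · intro fuel V acc rest d
    simp [pvDfsLoopA]
  · intro fuel V acc nb fl rest h ih rest2 d
    rw [pvDfsLoopA_cons_visited g fuel V nb fl rest acc h, List.cons_append,
      pvLoopB_cons_visited g fuel V nb fl _ _ h]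
    exact ih rest2 d
  · intro fuel V acc nb fl rest h r ih1 ih2 rest2 d
    have hvis : pvGetVis V nb = false := by simpa using h
    have hr : r = pvDfsA g fuel nb V := rfl
    rw [hr] at ih2
    rw [List.cons_append, pvDfsLoopA_cons_new g fuel V nb fl rest acc hvis]
    cases fuel with
    | zero =>
      rw [pvLoopB_cons_zero g V nb fl _ _ hvis]
      have ih2' := ih2 rest2 d
      simp only [pvDfsA_zero, Nat.sub_self, add_zero] at ih2' ⊢
      have hd : d + acc + fl = d + (acc + fl) := by ring
      rw [hd]
      exact ih2'
    | succ f =>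
      rw [pvLoopB_cons_new g f V nb fl _ _ hvis]
      have ih1' := ih1 (rest ++ rest2) (d + acc + fl) f rfl hvis
      rw [ih1']
      have ih2' := ih2 rest2 d
      have hd : d + acc + fl + (pvDfsA g (f + 1) nb V).1 =
          d + (acc + fl + (pvDfsA g (f + 1) nb V).1) := by ring
      rw [hd]
      rw [ih2']
      have hm1 := pvMonoA g (f + 1) nb V
      have hm2 := pvMonoLoop g (f + 1 - (pvUnvis V - pvUnvis (pvDfsA g (f + 1) nb V).2)) rest
        (pvDfsA g (f + 1) nb V).2 (acc + fl + (pvDfsA g (f + 1) nb V).1)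
      have hfuel : f + 1 - (pvUnvis V - pvUnvis (pvDfsA g (f + 1) nb V).2) -
          (pvUnvis (pvDfsA g (f + 1) nb V).2 -
           pvUnvis (pvDfsLoopA g (f + 1 - (pvUnvis V - pvUnvis (pvDfsA g (f + 1) nb V).2)) rest
             (pvDfsA g (f + 1) nb V).2 (acc + fl + (pvDfsA g (f + 1) nb V).1)).2) =
          f + 1 - (pvUnvis V -
           pvUnvis (pvDfsLoopA g (f + 1 - (pvUnvis V - pvUnvis (pvDfsA g (f + 1) nb V).2)) rest
             (pvDfsA g (f + 1) nb V).2 (acc + fl + (pvDfsA g (f + 1) nb V).1)).2) := by omega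
      rw [hfuel]

theorem pvKeyA (g : List (List (Int × Int))) (f : Nat) (city : Int) (V : List Bool)
    (X : List (Int × Int)) (e : Int) (hvis : pvGetVis V city = false) :
    pvLoopB g f (pvSetVis V city) (pvNbrs g city ++ X) e =
      pvLoopB g ((f + 1) - (pvUnvis V - pvUnvis (pvDfsA g (f + 1) city V).2))
        (pvDfsA g (f + 1) city V).2 X (e + (pvDfsA g (f + 1) city V).1) := by
  rw [pvDfsA_succ]
  have h1 := pvUnvis_setVis_eq V city hvis
  have h2 := pvMonoLoop g f (pvNbrs g city) (pvSetVis V city) 0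
  have h3 := pvKeyLoop g f (pvNbrs g city) (pvSetVis V city) 0 X e
  simp only [add_zero] at h3
  rw [h3]
  have hfuel : f - (pvUnvis (pvSetVis V city) -
      pvUnvis (pvDfsLoopA g f (pvNbrs g city) (pvSetVis V city) 0).2) =
      f + 1 - (pvUnvis V -
      pvUnvis (pvDfsLoopA g f (pvNbrs g city) (pvSetVis V city) 0).2) := by omega
  rw [hfuel]

theorem pvBuildGraph_length (n : Int) (connections : List (List Int)) :
    (pvBuildGraph n connections).length = n.toNat := by
  unfold pvBuildGraph
  have aux : ∀ (conns : List (List Int)) (g0 : List (List (Int × Int))),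
      (conns.foldl (fun g c =>
        match c with
        | [a, b] =>
          let g1 := PySem.List.pySetD g a (PySem.List.pyGetD g a [] ++ [(b, 1)])
          PySem.List.pySetD g1 b (PySem.List.pyGetD g1 b [] ++ [(a, 0)])
        | _ => g) g0).length = g0.length := by
    intro conns
    induction conns with
    | nil => intro g0; simp
    | cons c t ih =>
      intro g0
      rw [List.foldl_cons, ih]
      rcases c with _ | ⟨a, _ | ⟨b, _ | _⟩⟩ <;> simp [PySem.List.length_pySetD]
  rw [aux, List.length_replicate]

-- ===== VERDICT (by name: the statement is the Claim_ definition above) =====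
theorem pvGetVis_replicate_succ (m : Nat) :
    pvGetVis (false :: List.replicate m false) 0 = false := by
  simp [pvGetVis, PySem.List.pyGetD_zero_cons]

theorem minReorderDFS_spec : Claim_equal_minReorderDFS := by
  intro n connections _ _
  unfold Spec_minReorderDFS minReorderDFS minReorderDFS_alt
  have hg := pvBuildGraph_length n connections
  rcases hm : n.toNat with _ | m
  · -- n.toNat = 0: no city 0, both sides are 0
    rw [hm] at hg
    have hg0 : pvBuildGraph n connections = [] := List.length_eq_zero_iff.mp hg
    rw [hg0]
    simp only [List.replicate_zero]
    have e1 : pvNbrs ([] : List (List (Int × Int))) 0 = [] := rfl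
    have e2 : pvSetVis ([] : List Bool) 0 = [] := rfl
    have e3 : pvGetVis ([] : List Bool) 0 = true := rfl
    rw [pvDfsA_succ, e1, e2, pvDfsLoopA_nil,
      pvLoopB_cons_visited _ _ _ _ _ _ _ e3, pvLoopB_nil]
  · rw [List.replicate_succ]
    have hvis := pvGetVis_replicate_succ m
    rw [pvLoopB_cons_new _ _ _ _ _ _ _ hvis]
    rw [pvKeyA _ _ _ _ _ _ hvis]
    rw [pvLoopB_nil]
    omega
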